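-- pv_equiv track=rewrite | github.com/leekh7411/Protein-Protein-Network-Human | pp_pathways_sequences.py | k_mer_split
-- ===== SOURCE A (Python) =====
-- def k_mer_split(seq, k):
--     ret = ""
--     for i in range(0, len(seq)-k+1, k):
--         ret += seq[i:i+k]
--         if i == (len(seq)-k):
--             ret += "."
--         else:
--             ret += " "
--     return ret
-- ===== SOURCE B (Python) =====
-- def k_mer_split(seq, k):
--     if k <= 0:
--         return ""
--     parts = []
--     rest = seq
--     while len(rest) >= k:
--         parts.append(rest[:k])
--         rest = rest[k:]
--     if not parts:
--         return ""
--     return " ".join(parts) + ("." if not rest else " ")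
-- ===== Notes on version B (the rewrite author's own statement) =====
-- stated objective: alternative
-- what changed: B never indexes into seq: it consumes a shrinking copy of the string, biting off the k-char head while at least k chars remain, then joins the collected chunks once and appends '.' or ' ' depending on whether a non-empty remainder string is left over, instead of A's stride-k index loop that compares each index with len(seq)-k to pick the separator it concatenates per iteration.
import Mathlib
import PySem

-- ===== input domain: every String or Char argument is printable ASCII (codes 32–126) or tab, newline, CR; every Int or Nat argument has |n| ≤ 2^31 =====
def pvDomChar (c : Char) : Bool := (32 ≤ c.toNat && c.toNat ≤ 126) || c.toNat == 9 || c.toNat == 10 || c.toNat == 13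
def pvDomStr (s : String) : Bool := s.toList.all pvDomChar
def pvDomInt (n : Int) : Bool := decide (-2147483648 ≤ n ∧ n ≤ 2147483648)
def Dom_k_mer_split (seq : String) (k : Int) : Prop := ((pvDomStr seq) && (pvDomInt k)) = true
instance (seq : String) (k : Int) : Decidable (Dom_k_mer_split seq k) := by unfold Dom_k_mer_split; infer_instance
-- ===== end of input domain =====

-- B consumes a shrinking copy of the string head-first, collecting chunks, then joins once and picks the trailing separator from whether a remainder is left — instead of A's stride-index loop with a per-iteration separator branch (objective: alternative).


-- ===== PORT A =====
def k_mer_split (seq : String) (k : Int) : String :=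
  (PySem.List.pyRange 0 (PySem.Str.len seq - k + 1) k).foldl
    (fun ret i =>
      (ret ++ PySem.Str.slice seq (some i) (some (i + k))) ++
        (if i = PySem.Str.len seq - k then "." else " ")) ""

-- ===== PORT B =====
def pvAltLoop (k : Nat) (hk : 0 < k) (rest : List Char) (parts : List String) :
    List String × List Char :=
  if _h : k ≤ rest.length then
    pvAltLoop k hk (rest.drop k) (parts ++ [String.ofList (rest.take k)])
  else (parts, rest)
termination_by rest.length
decreasing_by simp; omega

def k_mer_split_alt (seq : String) (k : Int) : String :=
  if hk : k ≤ 0 then ""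
  else
    let (parts, rest) := pvAltLoop k.toNat (by omega) seq.toList []
    if parts = [] then ""
    else PySem.Str.join " " parts ++ (if rest = [] then "." else " ")


-- ===== PRECONDITION & SPEC =====
-- Pre_ excludes only k = 0, where Python's range(0, ·, 0) raises ValueError in A.
def Pre_k_mer_split (seq : String) (k : Int) : Prop := k ≠ 0
instance (seq : String) (k : Int) : Decidable (Pre_k_mer_split seq k) := by unfold Pre_k_mer_split; infer_instance
def pvWitness_k_mer_split : String × Int := ("ACGTAC", 3)
def Spec_k_mer_split (seq : String) (k : Int) (out : String) : Prop := out = k_mer_split_alt seq k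
instance (seq : String) (k : Int) (out : String) : Decidable (Spec_k_mer_split seq k out) := by unfold Spec_k_mer_split; infer_instance

-- ===== CLAIM (what is proved, stated in full; the proofs are below) =====
def Claim_equal_k_mer_split : Prop := ∀ (seq : String) (k : Int), Dom_k_mer_split seq k → Pre_k_mer_split seq k → Spec_k_mer_split seq k (k_mer_split seq k)

-- ===== LEMMAS AND PROOFS =====

lemma toList_foldl_append (g h : Int → String) :
    ∀ (L : List Int) (a : String),
      (L.foldl (fun r i => (r ++ g i) ++ h i) a).toList
        = a.toList ++ (L.map (fun i => (g i).toList ++ (h i).toList)).flatten := by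
  intro L
  induction L with
  | nil => intro a; simp
  | cons x xs ih =>
      intro a
      simp [List.foldl_cons, ih, String.toList_append]

lemma rangeChunks (n k : Int) (hk : 0 < k) (hn : 0 ≤ n) :
    PySem.List.pyRange 0 (n - k + 1) k
      = (List.range (n / k).toNat).map (fun (j : Nat) => k * (j : Int)) := by
  rw [PySem.List.pyRange_of_pos _ _ hk]
  have h1 : n - k + 1 - 0 + k - 1 = n := by ring
  by_cases h : (0:Int) < n - k + 1
  · rw [if_pos h, h1]; simp
  · rw [if_neg h]
    have : n / k = 0 := Int.ediv_eq_zero_of_lt hn (by omega)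
    simp [this]

lemma A_norm (seq : String) (k : Int) (hk : 0 < k) :
    (k_mer_split seq k).toList
      = ((List.range (((seq.toList.length : Int)) / k).toNat).map
          (fun (j : Nat) =>
            PySem.List.slice seq.toList (some (k * (j:Int))) (some (k * (j:Int) + k))
              ++ (if k * (j:Int) = (seq.toList.length : Int) - k then ['.'] else [' ']))).flatten := by
  unfold k_mer_split
  simp only [PySem.Str.len_eq]
  rw [rangeChunks _ _ hk (by positivity), toList_foldl_append]
  have hdot : (".").toList = ['.'] := by decide
  have hsp : (" ").toList = [' '] := by decide
  simp only [List.map_map, Function.comp_def, apply_ite String.toList, hdot, hsp,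
    PySem.Str.toList_slice, PySem.Chars.slice_eq_listSlice]
  simp

lemma sub_ediv_self (a b : Int) (hb : b ≠ 0) : (a - b)/b = a/b - 1 := by
  have h := Int.add_mul_ediv_right a (-1) hb
  have h2 : a + (-1)*b = a - b := by ring
  rw [h2] at h; omega

lemma A_peel (seq : String) (K : Nat) (hk : 0 < K) (hlt : K < seq.toList.length) :
    (k_mer_split seq (K:Int)).toList
      = seq.toList.take K ++ [' ']
        ++ (k_mer_split (String.ofList (seq.toList.drop K)) (K:Int)).toList := by
  have hK : (0:Int) < (K:Int) := by exact_mod_cast hk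
  rw [A_norm seq _ hK, A_norm _ _ hK]
  set l := seq.toList with hl
  set n := l.length with hn
  have hrest : (String.ofList (l.drop K)).toList = l.drop K := String.toList_ofList
  rw [hrest]
  have hlen : (l.drop K).length = n - K := by simp [hn]
  have hdiv : ((n:Int) - K) / K = (n:Int)/K - 1 := sub_ediv_self _ _ (by omega)
  have hq1 : 1 ≤ (n:Int)/(K:Int) := by
    rw [Int.le_ediv_iff_mul_le hK]; omega
  have hm : ((n:Int)/(K:Int)).toNat = (((n - K : Nat):Int)/(K:Int)).toNat + 1 := by
    push_cast [Nat.cast_sub hlt.le] at hdiv ⊢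
    omega
  rw [hm, List.range_succ_eq_map]
  simp only [List.map_cons, List.flatten_cons, List.map_map, Function.comp_def]
  congr 1
  · -- piece 0 = take K ++ [' ']
    have h0 : (K:Int) * ((0:Nat):Int) = ((0:Nat):Int) := by push_cast; ring
    rw [h0]
    have : ((0:Nat):Int) + (K:Int) = ((0:Nat):Int) + ((K:Nat):Int) := by push_cast; ring
    rw [this, PySem.List.slice_natCast_add]
    rw [if_neg (by push_cast; omega)]
    simp
  · -- shifted pieces
    have hlen' : ((l.drop K).length : Int) = (n:Int) - K := by
      rw [hlen]; push_cast [Nat.cast_sub hlt.le]; ring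
    rw [hlen']
    congr 1
    have hcast : (((n - K:Nat):Int)/(K:Int)).toNat = ((((n:Int) - K))/(K:Int)).toNat := by
      rw [Nat.cast_sub hlt.le]
    rw [hcast]
    refine List.map_congr_left ?_
    intro j _
    have e1 : (K:Int) * ((Nat.succ j : Nat):Int) = ((K*(j+1) : Nat):Int) := by push_cast; ring
    have e2 : ((K*(j+1) : Nat):Int) + (K:Int) = ((K*(j+1) : Nat):Int) + ((K:Nat):Int) := rfl
    have e3 : (K:Int) * ((j : Nat):Int) = ((K*j : Nat):Int) := by push_cast; ring
    have e4 : ((K*j : Nat):Int) + (K:Int) = ((K*j : Nat):Int) + ((K:Nat):Int) := rfl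
    rw [e1, e2, PySem.List.slice_natCast_add, e3, e4, PySem.List.slice_natCast_add,
      List.drop_drop]
    have e5 : K + K * j = K * (j+1) := by ring
    rw [e5]
    congr 1
    have hiff : (((K*(j+1) : Nat):Int) = (n:Int) - K) ↔ (((K*j : Nat):Int) = (n:Int) - K - K) := by
      have hx : ((K*(j+1) : Nat):Int) = ((K*j : Nat):Int) + (K:Int) := by push_cast; ring
      rw [hx]; omega
    rw [if_congr hiff rfl rfl]

lemma A_small (seq : String) (K : Nat) (hk : 0 < K) (hlt : seq.toList.length < K) :
    k_mer_split seq (K:Int) = "" := by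
  rw [← String.toList_inj, A_norm seq _ (by exact_mod_cast hk)]
  have hlt' : seq.length < K := by simpa using hlt
  have h0 : ((seq.length:Int)) / (K:Int) = 0 :=
    Int.ediv_eq_zero_of_lt (by positivity) (by exact_mod_cast hlt')
  simp [h0]

lemma A_base (seq : String) (K : Nat) (hk : 0 < K) (heq : seq.toList.length = K) :
    (k_mer_split seq (K:Int)).toList = seq.toList ++ ['.'] := by
  rw [A_norm seq _ (by exact_mod_cast hk)]
  have h1 : ((seq.toList.length:Int)) / (K:Int) = 1 := by
    rw [heq]; exact Int.ediv_self (by exact_mod_cast hk.ne')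
  rw [h1]
  simp only [Int.toNat_one, List.range_one, List.map_cons, List.map_nil,
    List.flatten_cons, List.flatten_nil, List.append_nil]
  have h0 : (K:Int) * ((0:Nat):Int) = ((0:Nat):Int) := by push_cast; ring
  rw [h0]
  have e : ((0:Nat):Int) + (K:Int) = ((0:Nat):Int) + ((K:Nat):Int) := rfl
  rw [e, PySem.List.slice_natCast_add]
  rw [if_pos (by push_cast; omega)]
  simp [List.take_of_length_le, show seq.length ≤ K from by simpa using heq.le]

lemma pyRange_neg_empty (b s : Int) (hs : s < 0) (hb : 0 ≤ b) :
    PySem.List.pyRange 0 b s = [] := by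
  simp only [PySem.List.pyRange]
  split_ifs <;> simp_all <;> omega

lemma A_neg (seq : String) (k : Int) (hk : k < 0) : k_mer_split seq k = "" := by
  unfold k_mer_split
  rw [pyRange_neg_empty _ _ hk (by simp [PySem.Str.len_eq]; omega)]
  rfl

lemma pvAltLoop_acc_aux (k : Nat) (hk : 0 < k) :
    ∀ (n : Nat) (rest : List Char), rest.length ≤ n → ∀ (parts : List String),
      pvAltLoop k hk rest parts
        = (parts ++ (pvAltLoop k hk rest []).1, (pvAltLoop k hk rest []).2) := by
  intro n
  induction n with
  | zero =>
      intro rest hle parts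
      unfold pvAltLoop
      rw [dif_neg (by omega), dif_neg (by omega)]
      simp
  | succ n ih =>
      intro rest hle parts
      unfold pvAltLoop
      by_cases h : k ≤ rest.length
      · rw [dif_pos h, dif_pos h]
        have hdl : (rest.drop k).length ≤ n := by simp; omega
        rw [ih _ hdl (parts ++ [String.ofList (rest.take k)]),
            ih _ hdl ([] ++ [String.ofList (rest.take k)])]
        simp
      · rw [dif_neg h, dif_neg h]
        simp

lemma pvAltLoop_acc (k : Nat) (hk : 0 < k) (rest : List Char) (parts : List String) :
    pvAltLoop k hk rest parts
      = (parts ++ (pvAltLoop k hk rest []).1, (pvAltLoop k hk rest []).2) :=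
  pvAltLoop_acc_aux k hk rest.length rest le_rfl parts

lemma chars_join_eq (sep : List Char) (l : List (List Char)) :
    PySem.Chars.join sep l = List.intercalate sep l := rfl

lemma intercalate_cons_cons (sep a b : List Char) (l : List (List Char)) :
    List.intercalate sep (a :: b :: l) = a ++ sep ++ List.intercalate sep (b :: l) := by
  simp [List.intercalate, List.intersperse]

lemma toList_join_cons (c : String) (P : List String) :
    (PySem.Str.join " " (c :: P)).toList
      = c.toList ++ (if P = [] then [] else [' '] ++ (PySem.Str.join " " P).toList) := by
  cases P with
  | nil => simp [PySem.Str.toList_join, chars_join_eq, List.intercalate]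
  | cons p ps =>
      simp only [PySem.Str.toList_join, List.map_cons, chars_join_eq]
      rw [intercalate_cons_cons]
      have : (" ").toList = [' '] := by decide
      simp [this]

lemma alt_nonpos (seq : String) (k : Int) (hk : k ≤ 0) : k_mer_split_alt seq k = "" := by
  unfold k_mer_split_alt
  rw [dif_pos hk]

lemma alt_small (seq : String) (K : Nat) (hk : 0 < K) (hlt : seq.toList.length < K) :
    k_mer_split_alt seq (K:Int) = "" := by
  unfold k_mer_split_alt
  rw [dif_neg (by omega)]
  have hstop : ∀ (h : 0 < K), pvAltLoop K h seq.toList [] = ([], seq.toList) := by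
    intro h
    unfold pvAltLoop
    rw [dif_neg (by omega)]
  simp only [Int.toNat_natCast, hstop]
  simp

lemma alt_base (seq : String) (K : Nat) (hk : 0 < K) (heq : seq.toList.length = K) :
    (k_mer_split_alt seq (K:Int)).toList = seq.toList ++ ['.'] := by
  have heq' : seq.length = K := by simpa using heq
  unfold k_mer_split_alt
  rw [dif_neg (by omega)]
  have hloop : ∀ (h : 0 < K), pvAltLoop K h seq.toList []
      = ([String.ofList seq.toList], []) := by
    intro h
    unfold pvAltLoop
    rw [dif_pos (by omega)]
    unfold pvAltLoop
    rw [dif_neg (by simp; omega)]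
    simp [List.take_of_length_le heq.le, List.drop_of_length_le heq.le]
  simp only [Int.toNat_natCast, hloop]
  simp

lemma alt_peel (seq : String) (K : Nat) (hk : 0 < K) (hlt : K < seq.toList.length) :
    (k_mer_split_alt seq (K:Int)).toList
      = seq.toList.take K ++ [' ']
        ++ (k_mer_split_alt (String.ofList (seq.toList.drop K)) (K:Int)).toList := by
  set l := seq.toList with hl
  obtain ⟨P, R, hPR⟩ : ∃ P R, pvAltLoop K hk (l.drop K) [] = (P, R) := ⟨_, _, rfl⟩
  have hPR' : ∀ (h : 0 < K), pvAltLoop K h (l.drop K) [] = (P, R) := fun h => hPR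
  have hstep : ∀ (h : 0 < K), pvAltLoop K h l []
      = (String.ofList (l.take K) :: P, R) := by
    intro h
    conv_lhs => unfold pvAltLoop
    rw [dif_pos (by omega)]
    rw [pvAltLoop_acc]
    simp [hPR']
  unfold k_mer_split_alt
  rw [dif_neg (by omega), dif_neg (by omega)]
  simp only [String.toList_ofList, Int.toNat_natCast, ← hl, hstep, hPR']
  by_cases hP : P = []
  · -- inner loop stopped immediately: R = l.drop K, which is nonempty
    have hR : R = l.drop K := by
      by_cases hc : K ≤ (l.drop K).length
      · exfalso
        unfold pvAltLoop at hPR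
        rw [dif_pos hc, pvAltLoop_acc] at hPR
        have := congrArg Prod.fst hPR
        simp [hP] at this
      · unfold pvAltLoop at hPR
        rw [dif_neg hc] at hPR
        exact (congrArg Prod.snd hPR).symm
    have hRne : R ≠ [] := by
      rw [hR]
      intro hcon
      have := congrArg List.length hcon
      simp at this
      omega
    simp [hP, hRne]
  · simp only [if_neg (by simp : ¬ (String.ofList (l.take K) :: P = [])), if_neg hP]
    simp only [String.toList_append, toList_join_cons, if_neg hP, String.toList_ofList]
    cases hRe : decide (R = []) <;> simp_all

lemma main_aux : ∀ (N : Nat) (seq : String), seq.toList.length ≤ N →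
    ∀ (k : Int), k ≠ 0 → k_mer_split seq k = k_mer_split_alt seq k := by
  intro N
  induction N with
  | zero =>
      intro seq hle k hk
      rcases lt_or_gt_of_ne hk with hneg | hpos
      · rw [A_neg seq k hneg, alt_nonpos seq k hneg.le]
      · obtain ⟨K, rfl⟩ : ∃ K:Nat, k = (K:Int) := ⟨k.toNat, (Int.toNat_of_nonneg hpos.le).symm⟩
        have hK : 0 < K := by exact_mod_cast hpos
        rw [A_small seq K hK (by omega), alt_small seq K hK (by omega)]
  | succ N ih =>
      intro seq hle k hk
      rcases lt_or_gt_of_ne hk with hneg | hpos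
      · rw [A_neg seq k hneg, alt_nonpos seq k hneg.le]
      · obtain ⟨K, rfl⟩ : ∃ K:Nat, k = (K:Int) := ⟨k.toNat, (Int.toNat_of_nonneg hpos.le).symm⟩
        have hK : 0 < K := by exact_mod_cast hpos
        rcases lt_trichotomy seq.toList.length K with h | h | h
        · rw [A_small seq K hK h, alt_small seq K hK h]
        · rw [← String.toList_inj, A_base seq K hK h, alt_base seq K hK h]
        · rw [← String.toList_inj, A_peel seq K hK h, alt_peel seq K hK h]
          have hrec := ih (String.ofList (seq.toList.drop K))
            (by simp only [String.toList_ofList, List.length_drop]; omega) (K:Int) (by exact_mod_cast hK.ne')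
          rw [hrec]

-- ===== VERDICT (by name: the statement is the Claim_ definition above) =====
theorem k_mer_split_spec : Claim_equal_k_mer_split := by
  intro seq k _ hk
  unfold Spec_k_mer_split
  exact main_aux seq.toList.length seq le_rfl k hk
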